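-- pv_equiv track=rewrite | github.com/a124839/lenovo-PythonSpace | WordCountAzrue_CN.py | sort_count2
-- ===== SOURCE A (Python) =====
-- def sort_count2(data):
--     count_dict={}
--     for str in data:
--         if str in count_dict.keys():
--             count_dict[str] = count_dict[str]+1
--         else:
--             count_dict[str] = 1
--     count_list = sorted(count_dict.items(), key=lambda x:x[1], reverse=True)
--     return count_list
-- ===== SOURCE B (Python) =====
-- def sort_count2(data):
--     counts = {}
--     for s in data:
--         counts[s] = counts.get(s, 0) + 1
--     max_count = max(counts.values(), default=0)
--     buckets = [[] for _ in range(max_count + 1)]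
--     for item in counts.items():
--         buckets[item[1]].append(item)
--     result = []
--     for cnt in range(max_count, 0, -1):
--         result += buckets[cnt]
--     return result
-- ===== Notes on version B (the rewrite author's own statement) =====
-- stated objective: alternative
-- what changed: Replaces sorted(items, key=count, reverse=True) with a counting (bucket) sort: items are dropped into per-count buckets during one in-order walk of the dict and emitted from the highest count down, which reproduces the stable descending order.
import Mathlib
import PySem

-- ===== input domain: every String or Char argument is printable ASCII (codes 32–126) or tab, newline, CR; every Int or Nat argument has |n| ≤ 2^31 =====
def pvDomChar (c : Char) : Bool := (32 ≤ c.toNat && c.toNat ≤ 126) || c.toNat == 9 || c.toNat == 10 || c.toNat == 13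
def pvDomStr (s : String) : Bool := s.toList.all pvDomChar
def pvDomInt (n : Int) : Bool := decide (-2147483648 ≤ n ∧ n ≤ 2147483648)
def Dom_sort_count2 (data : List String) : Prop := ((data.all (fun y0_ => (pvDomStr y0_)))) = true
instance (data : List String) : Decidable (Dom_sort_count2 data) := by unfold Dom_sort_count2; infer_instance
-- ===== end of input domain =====

-- B replaces the library sort by a counting (bucket) sort over per-count buckets; same return value, no speed claim.

-- ===== PORT A =====
def sort_count2 (data : List String) : List (String × Int) :=
  let count_dict : PySem.Dict String Int := data.foldl
    (fun d s => if d.contains s then d.insert s (d.getD s 0 + 1) else d.insert s 1)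
    PySem.Dict.empty
  PySem.List.sorted count_dict.items (fun x => x.2) true

-- ===== PORT B =====
-- indices into `buckets` are the counts, always in [1, max_count]; `.toNat`/`getD` are exact there
def sort_count2_alt (data : List String) : List (String × Int) :=
  let counts : PySem.Dict String Int := data.foldl
    (fun d s => d.insert s (d.getD s 0 + 1)) PySem.Dict.empty
  let maxCount : Int := PySem.List.maxD counts.values (fun v => v) 0
  let buckets0 : List (List (String × Int)) := List.replicate (maxCount + 1).toNat []
  let buckets := counts.items.foldl
    (fun bs item => bs.set item.2.toNat ((bs.getD item.2.toNat []) ++ [item])) buckets0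
  (PySem.List.pyRange maxCount 0 (-1)).foldl (fun res cnt => res ++ buckets.getD cnt.toNat []) []

-- ===== PRECONDITION & SPEC =====
def Spec_sort_count2 (data : List String) (out : List (String × Int)) : Prop := out = sort_count2_alt data
instance (data : List String) (out : List (String × Int)) : Decidable (Spec_sort_count2 data out) := by unfold Spec_sort_count2; infer_instance

-- ===== CLAIM (what is proved, stated in full; the proofs are below) =====
def Claim_equal_sort_count2 : Prop := ∀ (data : List String), Dom_sort_count2 data → Spec_sort_count2 data (sort_count2 data)

-- ===== LEMMAS AND PROOFS =====

-- A's two-branch dict update equals B's unconditional get-based update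
theorem pv_step_eq (d : PySem.Dict String Int) (s : String) :
    (if d.contains s then d.insert s (d.getD s 0 + 1) else d.insert s 1)
      = d.insert s (d.getD s 0 + 1) := by
  by_cases h : d.contains s
  · simp [h]
  · have hfind : d.items.find? (fun p => p.1 == s) = none := by
      rw [List.find?_eq_none]
      intro p hp hps
      exact h (List.any_eq_true.mpr ⟨p, hp, hps⟩)
    simp [h, PySem.Dict.getD, PySem.Dict.get?, hfind]

def pvCounts (data : List String) : PySem.Dict String Int :=
  data.foldl (fun d s => d.insert s (d.getD s 0 + 1)) PySem.Dict.empty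

theorem pv_getD_nonneg (d : PySem.Dict String Int) (s : String)
    (h : ∀ p ∈ d.items, 1 ≤ p.2) : 0 ≤ d.getD s 0 := by
  simp only [PySem.Dict.getD, PySem.Dict.get?]
  cases hf : d.items.find? (fun p => p.1 == s) with
  | none => simp
  | some p =>
    have := h p (List.mem_of_find?_eq_some hf)
    simp; omega

theorem pv_insert_pos (d : PySem.Dict String Int) (s : String) (v : Int) (hv : 1 ≤ v)
    (h : ∀ p ∈ d.items, 1 ≤ p.2) : ∀ p ∈ (d.insert s v).items, 1 ≤ p.2 := by
  intro p hp
  by_cases hc : d.contains s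
  · simp only [PySem.Dict.insert, if_pos hc, List.mem_map] at hp
    obtain ⟨q, hq, hpq⟩ := hp
    by_cases hqs : (q.1 == s) = true
    · rw [if_pos hqs] at hpq
      rw [← hpq]
      exact hv
    · rw [if_neg hqs] at hpq
      exact hpq ▸ h q hq
  · simp only [PySem.Dict.insert, if_neg hc, List.mem_append] at hp
    rcases hp with hp | hp
    · exact h p hp
    · simp only [List.mem_singleton] at hp
      rw [hp]
      exact hv

theorem pv_counts_pos (data : List String) :
    ∀ p ∈ (pvCounts data).items, 1 ≤ p.2 := by
  unfold pvCounts
  suffices H : ∀ (l : List String) (d : PySem.Dict String Int),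
      (∀ p ∈ d.items, 1 ≤ p.2) →
      ∀ p ∈ (l.foldl (fun d s => d.insert s (d.getD s 0 + 1)) d).items, 1 ≤ p.2 by
    exact H data PySem.Dict.empty (by intro p hp; simp [PySem.Dict.empty] at hp)
  intro l
  induction l with
  | nil => intro d hd; simpa using hd
  | cons s t ih =>
    intro d hd
    exact ih _ (pv_insert_pos d s _ (by have := pv_getD_nonneg d s hd; omega) hd)

theorem pv_le_maxD (d : PySem.Dict String Int) (p : String × Int) (hp : p ∈ d.items) :
    p.2 ≤ PySem.List.maxD d.values (fun v => v) 0 := by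
  have hmem : p.2 ∈ d.values := by
    simp only [PySem.Dict.values]; exact List.mem_map_of_mem hp
  cases hmax : PySem.List.max? d.values (fun v => v) with
  | none =>
    rw [PySem.List.max?_eq_none_iff] at hmax
    simp [hmax] at hmem
  | some m =>
    have := PySem.List.max?_isMax hmax p.2 hmem
    simp [PySem.List.maxD, hmax]
    exact this

-- the bucket-filling fold, characterised
theorem pv_bucket_fold (items : List (String × Int)) :
    ∀ (bs : List (List (String × Int))),
      (∀ p ∈ items, 1 ≤ p.2 ∧ p.2.toNat < bs.length) →
      ((items.foldl (fun bs item => bs.set item.2.toNat ((bs.getD item.2.toNat []) ++ [item])) bs).length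
          = bs.length)
      ∧ ∀ c : Nat, c < bs.length →
        (items.foldl (fun bs item => bs.set item.2.toNat ((bs.getD item.2.toNat []) ++ [item])) bs).getD c []
          = bs.getD c [] ++ items.filter (fun p => p.2 == (c : Int)) := by
  induction items with
  | nil => intro bs _; simp
  | cons p t ih =>
    intro bs h
    have hp := h p (by simp)
    set i := p.2.toNat with hi
    set bs' := bs.set i ((bs.getD i []) ++ [p]) with hbs'
    have hlen' : bs'.length = bs.length := by simp [hbs']
    have ht : ∀ q ∈ t, 1 ≤ q.2 ∧ q.2.toNat < bs'.length := by
      intro q hq; rw [hlen']; exact h q (by simp [hq])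
    obtain ⟨hl, hc⟩ := ih bs' ht
    constructor
    · simpa [hlen'] using hl
    · intro c hcb
      rw [List.foldl_cons]
      rw [hc c (by omega)]
      have hget : bs'.getD c [] = if c = i then bs.getD i [] ++ [p] else bs.getD c [] := by
        simp only [hbs', List.getD, List.getElem?_set]
        by_cases hci : c = i
        · subst hci; simp [hp.2]
        · have hic : ¬ i = c := fun h => hci h.symm
          simp [hci, hic]
      have hfilt : (p :: t).filter (fun q => q.2 == (c : Int))
          = (if c = i then [p] else []) ++ t.filter (fun q => q.2 == (c : Int)) := by
        by_cases hci : c = i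
        · have : p.2 = (c : Int) := by omega
          simp [this, hci]
        · have : ¬ (p.2 = (c : Int)) := by omega
          simp [this, hci]
      rw [hget, hfilt]
      by_cases hci : c = i <;> simp [hci]
  
-- range(max, 0, -1) is the descending list of counts
theorem pv_pyRange_down (m : Int) :
    PySem.List.pyRange m 0 (-1) = (List.range m.toNat).map (fun k : Nat => m - (k : Int)) := by
  simp only [PySem.List.pyRange]
  rw [if_neg (by norm_num)]
  rw [if_neg (by norm_num)]
  by_cases hm : (0:Int) < m
  · rw [if_pos hm]
    have h1 : ((m - 0 + -(-1) - 1) / -(-1)) = m := by norm_num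
    rw [h1]
    apply List.map_congr_left
    intro k _; ring
  · rw [if_neg hm]
    have : m.toNat = 0 := by omega
    simp [this]

theorem pv_range_pairwise_gt (m : Int) :
    ((List.range m.toNat).map (fun k : Nat => m - (k : Int))).Pairwise (· > ·) := by
  rw [List.pairwise_map]
  exact (List.pairwise_lt_range).imp (by intro a b h; omega)

theorem pv_mem_range_down (m v : Int) (h1 : 1 ≤ v) (h2 : v ≤ m) :
    v ∈ (List.range m.toNat).map (fun k : Nat => m - (k : Int)) := by
  simp only [List.mem_map]
  exact ⟨(m - v).toNat, List.mem_range.mpr (by omega), by omega⟩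

-- flatMap congruence on members
theorem pv_flatMap_congr {α β : Type} (vs : List α) (f g : α → List β)
    (h : ∀ v ∈ vs, f v = g v) : vs.flatMap f = vs.flatMap g := by
  induction vs with
  | nil => rfl
  | cons v t ih =>
    simp only [List.flatMap_cons, h v (by simp), ih (fun w hw => h w (by simp [hw]))]

theorem pv_insertBy_append (x : String × Int) (bef : (String × Int) → (String × Int) → Bool) :
    ∀ (A B : List (String × Int)), (∀ a ∈ A, bef x a = false) →
      PySem.List.insertBy bef x (A ++ B) = A ++ PySem.List.insertBy bef x B := by
  intro A
  induction A with
  | nil => intro B _; simp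
  | cons a t ih =>
    intro B h
    have ha : bef x a = false := h a (by simp)
    rw [List.cons_append,
      show PySem.List.insertBy bef x (a :: (t ++ B))
          = if bef x a then x :: a :: (t ++ B) else a :: PySem.List.insertBy bef x (t ++ B) from rfl]
    rw [ha]
    simp only [Bool.false_eq_true, if_false]
    rw [ih B (fun b hb => h b (by simp [hb]))]
    simp

theorem pv_insertBy_front (x : String × Int) (bef : (String × Int) → (String × Int) → Bool)
    (B : List (String × Int)) (h : ∀ b ∈ B, bef x b = true) :
    PySem.List.insertBy bef x B = x :: B := by
  cases B with
  | nil => rfl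
  | cons b t => simp [PySem.List.insertBy, h b (by simp)]

theorem pv_key_mem_flatMap (key : (String × Int) → Int) (vs : List Int) (l : List (String × Int))
    (y : String × Int) (hy : y ∈ vs.flatMap (fun v => l.filter (fun z => key z == v))) :
    key y ∈ vs := by
  simp only [List.mem_flatMap, List.mem_filter] at hy
  obtain ⟨v, hv, _, hk⟩ := hy
  simpa using (beq_iff_eq.mp hk ▸ hv)

-- inserting x into the grouped form keeps it grouped
theorem pv_insert_grouped (key : (String × Int) → Int) :
    ∀ (vs : List Int) (l : List (String × Int)) (x : String × Int),
      vs.Pairwise (· > ·) → key x ∈ vs →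
      PySem.List.insertBy (fun a b => decide (key b < key a)) x
          (vs.flatMap (fun v => l.filter (fun y => key y == v)))
        = vs.flatMap (fun v => (l ++ [x]).filter (fun y => key y == v)) := by
  intro vs
  induction vs with
  | nil => intro l x _ hx; simp at hx
  | cons v vs' ih =>
    intro l x hpw hx
    have hgt : ∀ w ∈ vs', w < v := fun w hw => (List.pairwise_cons.mp hpw).1 w hw
    have hpw' := (List.pairwise_cons.mp hpw).2
    simp only [List.flatMap_cons]
    by_cases hxv : key x = v
    · -- x belongs to the head group: goes right after it
      rw [pv_insertBy_append x _ _ _ (by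
        intro a ha
        have : key a = v := by simpa using (List.mem_filter.mp ha).2
        simp [this, hxv])]
      rw [pv_insertBy_front x _ _ (by
        intro b hb
        have := pv_key_mem_flatMap key vs' l b hb
        have := hgt _ this
        simp [hxv]; omega)]
      have htail : vs'.flatMap (fun w => l.filter (fun y => key y == w))
          = vs'.flatMap (fun w => (l ++ [x]).filter (fun y => key y == w)) := by
        apply pv_flatMap_congr
        intro w hw
        have : ¬ (key x = w) := by have := hgt w hw; omega
        simp [List.filter_append, this]
      rw [htail]
      have hhead : (l ++ [x]).filter (fun y => key y == v)
          = l.filter (fun y => key y == v) ++ [x] := by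
        simp [List.filter_append, hxv]
      rw [hhead]
      simp
    · -- x belongs to a later group
      have hx' : key x ∈ vs' := by
        rcases List.mem_cons.mp hx with h | h
        · exact absurd h hxv
        · exact h
      rw [pv_insertBy_append x _ _ _ (by
        intro a ha
        have hka : key a = v := by simpa using (List.mem_filter.mp ha).2
        have : key x < v := hgt _ hx'
        simp [hka]; omega)]
      rw [ih l x hpw' hx']
      have hhead : (l ++ [x]).filter (fun y => key y == v)
          = l.filter (fun y => key y == v) := by
        simp [List.filter_append, hxv]
      rw [hhead]

-- stable reverse sort = concatenation of the key groups along any strictly descending cover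
theorem pv_sorted_rev_eq_flatMap (key : (String × Int) → Int) :
    ∀ (l : List (String × Int)) (vs : List Int), vs.Pairwise (· > ·) →
      (∀ x ∈ l, key x ∈ vs) →
      PySem.List.sorted l key true = vs.flatMap (fun v => l.filter (fun x => key x == v)) := by
  intro l
  induction l using List.reverseRecOn with
  | nil => intro vs _ _; simp [PySem.List.sorted]
  | append_singleton t x ih =>
    intro vs hpw hmem
    rw [PySem.List.sorted_rev_eq_foldl_insertBy, List.foldl_append,
        ← PySem.List.sorted_rev_eq_foldl_insertBy]
    simp only [List.foldl_cons, List.foldl_nil]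
    rw [ih vs hpw (fun y hy => hmem y (by simp [hy]))]
    exact pv_insert_grouped key vs t x hpw (hmem x (by simp))

-- ===== VERDICT (by name: the statement is the Claim_ definition above) =====
theorem sort_count2_spec : Claim_equal_sort_count2 := by
  intro data _
  unfold Spec_sort_count2 sort_count2 sort_count2_alt
  have hcounts : data.foldl
      (fun d s => if d.contains s then d.insert s (d.getD s 0 + 1) else d.insert s 1)
      PySem.Dict.empty = pvCounts data :=
    PySem.List.foldl_congr_mem _ _ _ _ (fun acc s _ => pv_step_eq acc s)
  rw [hcounts]
  rw [show (data.foldl (fun d s => d.insert s (d.getD s 0 + 1)) PySem.Dict.empty) = pvCounts data from rfl]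
  set d := pvCounts data with hd
  set m : Int := PySem.List.maxD d.values (fun v => v) 0 with hm
  have hbounds : ∀ p ∈ d.items, 1 ≤ p.2 ∧ p.2 ≤ m := by
    intro p hp; exact ⟨pv_counts_pos data p hp, pv_le_maxD d p hp⟩
  have hN : ∀ p ∈ d.items, 1 ≤ p.2 ∧ p.2.toNat < (List.replicate (m + 1).toNat ([] : List (String × Int))).length := by
    intro p hp
    have := hbounds p hp
    constructor
    · exact this.1
    · simp; omega
  obtain ⟨hlen, hchar⟩ := pv_bucket_fold d.items _ hN
  rw [PySem.List.foldl_append_eq_flatMap]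
  rw [pv_pyRange_down m]
  rw [pv_sorted_rev_eq_flatMap (fun x => x.2) d.items _ (pv_range_pairwise_gt m)
      (fun x hx => pv_mem_range_down m x.2 (hbounds x hx).1 (hbounds x hx).2)]
  simp only [List.nil_append]
  apply pv_flatMap_congr
  intro v hv
  simp only [List.mem_map, List.mem_range] at hv
  obtain ⟨k, hk, hkv⟩ := hv
  have hv1 : 1 ≤ v := by omega
  have hvm : v ≤ m := by omega
  have hvn : v.toNat < (List.replicate (m + 1).toNat ([] : List (String × Int))).length := by
    simp; omega
  rw [hchar v.toNat hvn]
  have : ((v.toNat : Nat) : Int) = v := by omega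
  simp [List.getD, this]
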